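-- pv_equiv track=rewrite | github.com/miliar/Code_Jam_Webscraper | solutions_python/Problem_199/1383.py | fit
-- ===== SOURCE A (Python) =====
-- def fit(s, k, g):
--     ss = s
--     s = [0 if x == '-' else 1 for x in list(s)]
--     for i in range(len(s) - k + 1):
--         if (g >> i) & 1:
--             for j in range(k):
--                 s[i + j] += 1
--     if all([x % 2 for x in s]):
--         print (k, ss, s)
--     return all([x % 2 for x in s])
-- ===== SOURCE B (Python) =====
-- def fit(s, k, g):
--     # Difference array + running prefix sum: O(n + number of windows) instead of A's O(n*k).
--     n = len(s)
--     diff = [0] * (n + 1)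
--     if k > 0:
--         for i in range(n - k + 1):
--             if (g >> i) & 1:
--                 diff[i] += 1
--                 diff[i + k] -= 1
--     cur = 0
--     for i, ch in enumerate(s):
--         cur += diff[i]
--         if ((0 if ch == '-' else 1) + cur) % 2 == 0:
--             return False
--     return True
-- ===== Notes on version B (the rewrite author's own statement) =====
-- stated objective: faster
-- what changed: Replaces A's per-window inner increment loop with a difference array plus a single running prefix-sum pass (with early exit), turning O(n*k) work into O(n).
import Mathlib
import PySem

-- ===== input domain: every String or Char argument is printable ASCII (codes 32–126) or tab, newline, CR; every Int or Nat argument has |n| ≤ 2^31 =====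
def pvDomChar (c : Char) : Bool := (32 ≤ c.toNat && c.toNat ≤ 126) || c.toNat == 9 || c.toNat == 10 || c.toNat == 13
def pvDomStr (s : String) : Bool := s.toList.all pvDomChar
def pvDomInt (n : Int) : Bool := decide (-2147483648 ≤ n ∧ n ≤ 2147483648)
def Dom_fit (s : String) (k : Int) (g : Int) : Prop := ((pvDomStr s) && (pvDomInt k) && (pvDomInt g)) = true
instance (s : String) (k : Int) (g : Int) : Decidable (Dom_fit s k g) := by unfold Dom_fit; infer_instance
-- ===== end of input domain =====

-- B replaces A's per-window inner increment loop (O(n*k) updates) by a difference array with one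
-- running prefix-sum pass; equivalence is about the RETURN value only (A also prints a debug line
-- when it returns True; B does not).

-- ===== PORT A =====
-- Python '(g >> i) & 1' truthiness; the loop indices i are always ≥ 0, so 'i.toNat' is exact
def pvBit (g : Int) (i : Int) : Bool := decide (PySem.Int.band (g >>> i.toNat) 1 ≠ 0)

-- inner loop 'for j in range(k): s[i+j] += 1' (indices always in range in A, so pySetD/pyGetD are exact)
def fitInner (k : Int) (i : Int) (a : List Int) : List Int :=
  (PySem.List.pyRange 0 k 1).foldl
    (fun a2 j => PySem.List.pySetD a2 (i + j) (PySem.List.pyGetD a2 (i + j) 0 + 1)) a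

-- outer loop 'for i in range(len(s) - k + 1): if (g >> i) & 1: …'
def fitOuter (k : Int) (g : Int) (L : List Int) (a : List Int) : List Int :=
  L.foldl (fun a i => if pvBit g i then fitInner k i a else a) a

def fit (s : String) (k : Int) (g : Int) : Bool :=
  let arr0 : List Int := s.toList.map (fun x => if x = '-' then (0 : Int) else 1)
  let arr := fitOuter k g (PySem.List.pyRange 0 ((arr0.length : Int) - k + 1) 1) arr0
  arr.all (fun x => decide (PySem.Int.mod x 2 ≠ 0))

-- ===== PORT B =====
-- 'diff[i] += 1; diff[i+k] -= 1' for each set bit (indices always in range, so pySetD/pyGetD exact)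
def fitAltDiff (k : Int) (g : Int) (L : List Int) (d : List Int) : List Int :=
  L.foldl (fun d i =>
    if pvBit g i then
      let d1 := PySem.List.pySetD d i (PySem.List.pyGetD d i 0 + 1)
      PySem.List.pySetD d1 (i + k) (PySem.List.pyGetD d1 (i + k) 0 - 1)
    else d) d

-- 'for i, ch in enumerate(s): cur += diff[i]; if (… + cur) % 2 == 0: return False'
def fitAltLoop (diff : List Int) : List Char → Int → Int → Bool
  | [], _, _ => true
  | c :: cs, i, cur =>
    let cur' := cur + PySem.List.pyGetD diff i 0
    if PySem.Int.mod ((if c = '-' then (0 : Int) else 1) + cur') 2 = 0 then false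
    else fitAltLoop diff cs (i + 1) cur'

def fit_alt (s : String) (k : Int) (g : Int) : Bool :=
  let n := s.toList.length
  let diff0 : List Int := List.replicate (n + 1) 0
  let diff :=
    if k > 0 then fitAltDiff k g (PySem.List.pyRange 0 ((n : Int) - k + 1) 1) diff0
    else diff0
  fitAltLoop diff s.toList 0 0

-- ===== PRECONDITION & SPEC =====
def Spec_fit (s : String) (k : Int) (g : Int) (out : Bool) : Prop := out = fit_alt s k g
instance (s : String) (k : Int) (g : Int) (out : Bool) : Decidable (Spec_fit s k g out) := by unfold Spec_fit; infer_instance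

-- ===== CLAIM (what is proved, stated in full; the proofs are below) =====
def Claim_equal_fit : Prop := ∀ (s : String) (k : Int) (g : Int), Dom_fit s k g → Spec_fit s k g (fit s k g)

-- ===== LEMMAS AND PROOFS =====

-- the bump 's[q] += 1' as a function (definitionally what fitInner folds)
def pvBump (a : List Int) (q : Int) : List Int :=
  PySem.List.pySetD a q (PySem.List.pyGetD a q 0 + 1)

-- number of flipped windows covering position p
def pvCov (k g : Int) (L : List Int) (p : Nat) : Nat :=
  L.countP (fun i => pvBit g i && decide (i ≤ (p : Int) ∧ (p : Int) < i + k))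

-- sum of the first m entries of the difference array
def pvPS (d : List Int) (m : Nat) : Int := ∑ t ∈ Finset.range m, d.getD t 0

theorem getD_set_int (xs : List Int) (q : Nat) (v : Int) (p : Nat) :
    (xs.set q v).getD p 0 = if p = q ∧ q < xs.length then v else xs.getD p 0 := by
  simp only [List.getD_eq_getElem?_getD, List.getElem?_set]
  split_ifs with h1 h2 h3 h3 <;> simp_all

theorem pvBump_getD (a : List Int) (q : Int) (hq : 0 ≤ q) :
    (pvBump a q).length = a.length ∧
    ∀ p : Nat, p < a.length →
      (pvBump a q).getD p 0 = a.getD p 0 + (if (p : Int) = q then 1 else 0) := by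
  unfold pvBump
  rw [PySem.List.pySetD_of_nonneg _ _ hq, PySem.List.pyGetD_of_nonneg _ _ hq]
  refine ⟨by simp, fun p hp => ?_⟩
  rw [getD_set_int]
  split_ifs with h1 h2 h2
  · obtain ⟨rfl, -⟩ := h1; rfl
  · exfalso; omega
  · exfalso; exact h1 ⟨by omega, by omega⟩
  · simp

theorem inner_nat (m : Nat) (i : Int) (hi : 0 ≤ i) (a : List Int) :
    ((List.range m).foldl (fun a2 t => pvBump a2 (i + (t : Nat))) a).length = a.length ∧
    ∀ p : Nat, p < a.length →
      ((List.range m).foldl (fun a2 t => pvBump a2 (i + (t : Nat))) a).getD p 0 =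
        a.getD p 0 + (if i ≤ (p : Int) ∧ (p : Int) < i + m then 1 else 0) := by
  induction m with
  | zero => refine ⟨rfl, fun p hp => ?_⟩; simp
  | succ m ih =>
    rw [List.range_succ, List.foldl_append]
    obtain ⟨hl, hg⟩ := ih
    obtain ⟨hl', hg'⟩ := pvBump_getD ((List.range m).foldl (fun a2 t => pvBump a2 (i + (t : Nat))) a) (i + m) (by omega)
    simp only [List.foldl_cons, List.foldl_nil]
    refine ⟨by rw [hl', hl], fun p hp => ?_⟩
    rw [hg' p (by omega), hg p hp]
    push_cast
    split_ifs <;> omega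

theorem fitInner_getD (k i : Int) (a : List Int) (hi : 0 ≤ i) :
    (fitInner k i a).length = a.length ∧
    ∀ p : Nat, p < a.length →
      (fitInner k i a).getD p 0 =
        a.getD p 0 + (if i ≤ (p : Int) ∧ (p : Int) < i + k then 1 else 0) := by
  have hfi : fitInner k i a = (List.range k.toNat).foldl (fun a2 t => pvBump a2 (i + (t : Nat))) a := by
    unfold fitInner
    rw [PySem.List.pyRange_one, List.foldl_map]
    simp only [Int.sub_zero, zero_add]
    rfl
  rw [hfi]
  obtain ⟨hl, hg⟩ := inner_nat k.toNat i hi a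
  refine ⟨hl, fun p hp => ?_⟩
  rw [hg p hp]
  congr 1
  by_cases hk : 0 ≤ k
  · rw [Int.toNat_of_nonneg hk]
  · have : k.toNat = 0 := by omega
    rw [this]
    split_ifs <;> omega

theorem fitOuter_getD (k g : Int) (L : List Int) (hL : ∀ i ∈ L, 0 ≤ i) (a : List Int) :
    (fitOuter k g L a).length = a.length ∧
    ∀ p : Nat, p < a.length →
      (fitOuter k g L a).getD p 0 = a.getD p 0 + (pvCov k g L p : Int) := by
  induction L generalizing a with
  | nil => exact ⟨rfl, fun p hp => by simp [fitOuter, pvCov]⟩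
  | cons i L ih =>
    have hi : 0 ≤ i := hL i (by simp)
    have hL' : ∀ x ∈ L, 0 ≤ x := fun x hx => hL x (by simp [hx])
    unfold fitOuter
    simp only [List.foldl_cons]
    by_cases hb : pvBit g i
    · rw [if_pos hb]
      obtain ⟨hl1, hg1⟩ := fitInner_getD k i a hi
      obtain ⟨hl2, hg2⟩ := ih hL' (fitInner k i a)
      refine ⟨by rw [← fitOuter, hl2, hl1], fun p hp => ?_⟩
      rw [← fitOuter, hg2 p (by omega), hg1 p hp]
      by_cases h : i ≤ (p : Int) ∧ (p : Int) < i + k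
      · simp [pvCov, hb, h]; ring
      · simp [pvCov, hb, h]
    · rw [if_neg hb]
      obtain ⟨hl2, hg2⟩ := ih hL' a
      refine ⟨by rw [← fitOuter, hl2], fun p hp => ?_⟩
      rw [← fitOuter, hg2 p hp]
      simp [pvCov, hb]

theorem pvPS_set (d : List Int) (q : Nat) (v : Int) (m : Nat) (hq : q < d.length) :
    pvPS (d.set q v) m = pvPS d m + (if q < m then v - d.getD q 0 else 0) := by
  unfold pvPS
  have : ∀ t, (d.set q v).getD t 0 = d.getD t 0 + (if t = q then v - d.getD q 0 else 0) := by
    intro t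
    rw [getD_set_int]
    split_ifs with h1 h2 h2 <;> simp_all
  simp only [this, Finset.sum_add_distrib, Finset.sum_ite_eq' (Finset.range m)]
  simp [Finset.mem_range]

theorem fitAltDiff_PS (n : Nat) (k g : Int) (hk : 0 < k) (L : List Int)
    (hL : ∀ i ∈ L, 0 ≤ i ∧ i + k ≤ (n : Int)) :
    ∀ d : List Int, d.length = n + 1 →
      (fitAltDiff k g L d).length = n + 1 ∧
      ∀ p : Nat, p < n →
        pvPS (fitAltDiff k g L d) (p + 1) = pvPS d (p + 1) + (pvCov k g L p : Int) := by
  induction L with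
  | nil => exact fun d hd => ⟨hd, fun p hp => by simp [fitAltDiff, pvCov]⟩
  | cons i L ih =>
    intro d hd
    obtain ⟨hi0, hik⟩ := hL i (by simp)
    have hL' : ∀ x ∈ L, 0 ≤ x ∧ x + k ≤ (n : Int) := fun x hx => hL x (by simp [hx])
    unfold fitAltDiff
    simp only [List.foldl_cons]
    by_cases hb : pvBit g i
    · rw [if_pos hb]
      rw [PySem.List.pySetD_of_nonneg _ _ hi0, PySem.List.pyGetD_of_nonneg _ _ hi0,
          PySem.List.pySetD_of_nonneg _ _ (by omega : (0:Int) ≤ i + k),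
          PySem.List.pyGetD_of_nonneg _ _ (by omega : (0:Int) ≤ i + k)]
      set d1 := d.set i.toNat (d.getD i.toNat 0 + 1) with hd1
      set d2 := d1.set (i + k).toNat (d1.getD (i + k).toNat 0 - 1) with hd2
      have hld1 : d1.length = n + 1 := by simp [hd1, hd]
      have hld2 : d2.length = n + 1 := by simp [hd2, hld1]
      obtain ⟨hl, hg⟩ := ih hL' d2 hld2
      refine ⟨by rw [← fitAltDiff] at *; exact hl, fun p hp => ?_⟩
      rw [← fitAltDiff] at *
      rw [hg p hp]
      have e2 : pvPS d2 (p + 1) = pvPS d1 (p + 1) + (if (i + k).toNat < p + 1 then -1 else 0) := by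
        rw [hd2, pvPS_set d1 _ _ _ (by omega)]
        split_ifs <;> ring
      have e1 : pvPS d1 (p + 1) = pvPS d (p + 1) + (if i.toNat < p + 1 then 1 else 0) := by
        rw [hd1, pvPS_set d _ _ _ (by omega)]
        split_ifs <;> ring
      rw [e2, e1]
      by_cases h : i ≤ (p : Int) ∧ (p : Int) < i + k
      · simp [pvCov, hb, h]
        split_ifs <;> omega
      · simp [pvCov, hb, h]
        split_ifs <;> omega
    · rw [if_neg hb]
      obtain ⟨hl, hg⟩ := ih hL' d hd
      refine ⟨by rw [← fitAltDiff] at *; exact hl, fun p hp => ?_⟩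
      rw [← fitAltDiff] at *
      rw [hg p hp]
      simp [pvCov, hb]

theorem fitAltLoop_eq (diff : List Int) (chars : List Char) :
    ∀ (cs : List Char) (j : Nat) (cur : Int), chars.drop j = cs → cur = pvPS diff j →
      fitAltLoop diff cs (j : Int) cur =
        (List.range' j (chars.length - j)).all (fun p =>
          decide (PySem.Int.mod ((if chars.getD p 'x' = '-' then (0 : Int) else 1) + pvPS diff (p + 1)) 2 ≠ 0)) := by
  intro cs
  induction cs with
  | nil =>
    intro j cur hdrop hcur
    have : chars.length ≤ j := List.drop_eq_nil_iff.mp hdrop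
    rw [show chars.length - j = 0 by omega]
    simp [fitAltLoop]
  | cons c cs ih =>
    intro j cur hdrop hcur
    have hj : j < chars.length := by
      by_contra h
      rw [List.drop_eq_nil_of_le (by omega)] at hdrop
      exact absurd hdrop (by simp)
    have hget : chars[j]? = some c := by
      have h0 := congrArg (fun l => l[0]?) hdrop
      simpa [List.getElem?_drop] using h0
    have hgetD : chars.getD j 'x' = c := by
      simp [List.getD_eq_getElem?_getD, hget]
    have hdrop' : chars.drop (j + 1) = cs := by
      have : chars.drop (j + 1) = (chars.drop j).drop 1 := by
        rw [List.drop_drop]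
      rw [this, hdrop]
      rfl
    have hlen : chars.length - j = (chars.length - (j + 1)) + 1 := by omega
    rw [hlen, List.range'_succ]
    have hcur' : cur + PySem.List.pyGetD diff (j : Int) 0 = pvPS diff (j + 1) := by
      rw [hcur, PySem.List.pyGetD_natCast]
      simp [pvPS, Finset.sum_range_succ]
    simp only [fitAltLoop, hcur', List.all_cons, hgetD]
    by_cases hz : PySem.Int.mod ((if c = '-' then (0 : Int) else 1) + pvPS diff (j + 1)) 2 = 0
    · rw [if_pos hz, hz]
      simp
    · rw [if_neg hz]
      have hcast : ((j : Int) + 1) = ((j + 1 : Nat) : Int) := by push_cast; ring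
      rw [hcast, ih (j + 1) (pvPS diff (j + 1)) hdrop' rfl]
      have hd : (decide (PySem.Int.mod ((if c = '-' then (0 : Int) else 1) + pvPS diff (j + 1)) 2 ≠ 0)) = true := by
        simpa using hz
      rw [hd, Bool.true_and]

theorem all_eq_range_all (xs : List Int) (f : Int → Bool) :
    xs.all f = (List.range' 0 xs.length).all (fun p => f (xs.getD p 0)) := by
  rw [Bool.eq_iff_iff]
  simp only [List.all_eq_true, List.mem_range'_1, Nat.zero_add, List.forall_mem_iff_getElem]
  constructor
  · rintro h p ⟨h0, hp⟩
    rw [List.getD_eq_getElem _ _ hp]; exact h p hp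
  · intro h i hi
    have := h i ⟨Nat.zero_le _, hi⟩
    rwa [List.getD_eq_getElem _ _ hi] at this

theorem pvPS_replicate (m t : Nat) : pvPS (List.replicate m (0:Int)) t = 0 := by
  unfold pvPS
  refine Finset.sum_eq_zero fun x _ => ?_
  simp [List.getD_eq_getElem?_getD, List.getElem?_replicate]
  split <;> rfl

theorem fit_eq_common (s : String) (k g : Int) :
    fit s k g =
      (List.range' 0 s.toList.length).all (fun p =>
        decide (PySem.Int.mod ((if s.toList.getD p 'x' = '-' then (0 : Int) else 1) +
          (pvCov k g (PySem.List.pyRange 0 ((s.toList.length : Int) - k + 1) 1) p : Int)) 2 ≠ 0)) := by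
  have harr0 : (s.toList.map (fun x => if x = '-' then (0 : Int) else 1)).length = s.toList.length :=
    List.length_map _
  have hfit : fit s k g = (fitOuter k g (PySem.List.pyRange 0 ((s.toList.length : Int) - k + 1) 1)
      (s.toList.map (fun x => if x = '-' then (0 : Int) else 1))).all (fun x => decide (PySem.Int.mod x 2 ≠ 0)) := by
    show (fitOuter k g (PySem.List.pyRange 0 ((((s.toList.map (fun x => if x = '-' then (0 : Int) else 1)).length : Int)) - k + 1) 1) _).all _ = _
    rw [harr0]
  rw [hfit]
  have hL : ∀ i ∈ PySem.List.pyRange 0 ((s.toList.length : Int) - k + 1) 1, (0:Int) ≤ i := by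
    intro i hi
    exact (PySem.List.mem_pyRange_one.mp hi).1
  obtain ⟨hl, hg⟩ := fitOuter_getD k g _ hL (s.toList.map (fun x => if x = '-' then (0 : Int) else 1))
  rw [all_eq_range_all, hl, harr0]
  rw [Bool.eq_iff_iff]
  simp only [List.all_eq_true, List.mem_range'_1, Nat.zero_add]
  constructor <;> intro h p hp
  · have := h p hp
    rw [hg p (by omega)] at this
    rwa [List.getD_eq_getElem _ _ (by simpa using hp.2), List.getElem_map,
         ← List.getD_eq_getElem s.toList 'x' (by simpa using hp.2)] at this
  · have := h p hp
    rw [hg p (by omega)]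
    rwa [List.getD_eq_getElem _ _ (by simpa using hp.2), List.getElem_map,
         ← List.getD_eq_getElem s.toList 'x' (by simpa using hp.2)]

theorem fit_alt_eq_common (s : String) (k g : Int) :
    fit_alt s k g =
      (List.range' 0 s.toList.length).all (fun p =>
        decide (PySem.Int.mod ((if s.toList.getD p 'x' = '-' then (0 : Int) else 1) +
          (pvCov k g (PySem.List.pyRange 0 ((s.toList.length : Int) - k + 1) 1) p : Int)) 2 ≠ 0)) := by
  set n := s.toList.length with hn
  set L := PySem.List.pyRange 0 ((n : Int) - k + 1) 1 with hLdef
  by_cases hk : k > 0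
  · have hL : ∀ i ∈ L, (0:Int) ≤ i ∧ i + k ≤ (n : Int) := by
      intro i hi
      have := PySem.List.mem_pyRange_one.mp hi
      omega
    obtain ⟨hld, hps⟩ := fitAltDiff_PS n k g hk L hL (List.replicate (n + 1) 0) (by simp)
    have hfa : fit_alt s k g = fitAltLoop (if k > 0 then fitAltDiff k g L (List.replicate (n + 1) 0) else List.replicate (n + 1) 0) s.toList 0 0 := rfl
    rw [hfa, if_pos hk]
    have hloop := fitAltLoop_eq (fitAltDiff k g L (List.replicate (n + 1) 0)) s.toList s.toList 0 0 rfl (by simp [pvPS])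
    rw [Nat.cast_zero] at hloop
    rw [hloop, Nat.sub_zero]
    rw [Bool.eq_iff_iff]
    simp only [List.all_eq_true, List.mem_range'_1, Nat.zero_add]
    constructor <;> intro h p hp <;> have hh := h p hp
    · rwa [hps p hp.2, pvPS_replicate, zero_add] at hh
    · rwa [hps p hp.2, pvPS_replicate, zero_add]
  · have hfa : fit_alt s k g = fitAltLoop (if k > 0 then fitAltDiff k g L (List.replicate (n + 1) 0) else List.replicate (n + 1) 0) s.toList 0 0 := rfl
    rw [hfa, if_neg hk]
    have hloop := fitAltLoop_eq (List.replicate (n + 1) (0:Int)) s.toList s.toList 0 0 rfl (by simp [pvPS])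
    rw [Nat.cast_zero] at hloop
    rw [hloop, Nat.sub_zero]
    have hcov : ∀ p : Nat, pvCov k g L p = 0 := by
      intro p
      refine List.countP_eq_zero.mpr fun i _ => ?_
      simp only [Bool.and_eq_true, decide_eq_true_eq]
      rintro ⟨-, h1, h2⟩
      omega
    rw [Bool.eq_iff_iff]
    simp only [List.all_eq_true, List.mem_range'_1, Nat.zero_add, hcov, Nat.cast_zero,
      pvPS_replicate, add_zero]
    exact Iff.rfl


-- ===== VERDICT (by name: the statement is the Claim_ definition above) =====
theorem fit_spec : Claim_equal_fit := by
  intro s k g _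
  unfold Spec_fit
  rw [fit_eq_common, fit_alt_eq_common]
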